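-- pv_equiv track=rewrite | github.com/myc9799/Online-Time-series-Stock-Price-Trading-Algorithm | RollingMean/find_buy.py | get_sudden_drop_list
-- ===== SOURCE A (Python) =====
-- def get_sudden_drop_list(date, day):
--
--   sudden_drop_list = []
--   for days in day:
--     col = []
--     for item in date:
--       if item[:10] == days:
--         col.append(item)
--     sudden_drop_list.append(col)
--
--   return sudden_drop_list
-- ===== SOURCE B (Python) =====
-- def get_sudden_drop_list(date, day):
--     groups = {}
--     for item in date:
--         groups.setdefault(item[:10], []).append(item)
--     return [groups.get(days, []) for days in day]
-- ===== Notes on version B (the rewrite author's own statement) =====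
-- stated objective: faster
-- what changed: Replaces the per-day rescans of the whole date list with a single pass that groups entries in a dict keyed by the 10-char prefix, then answers each day by one dict lookup.
import Mathlib
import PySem

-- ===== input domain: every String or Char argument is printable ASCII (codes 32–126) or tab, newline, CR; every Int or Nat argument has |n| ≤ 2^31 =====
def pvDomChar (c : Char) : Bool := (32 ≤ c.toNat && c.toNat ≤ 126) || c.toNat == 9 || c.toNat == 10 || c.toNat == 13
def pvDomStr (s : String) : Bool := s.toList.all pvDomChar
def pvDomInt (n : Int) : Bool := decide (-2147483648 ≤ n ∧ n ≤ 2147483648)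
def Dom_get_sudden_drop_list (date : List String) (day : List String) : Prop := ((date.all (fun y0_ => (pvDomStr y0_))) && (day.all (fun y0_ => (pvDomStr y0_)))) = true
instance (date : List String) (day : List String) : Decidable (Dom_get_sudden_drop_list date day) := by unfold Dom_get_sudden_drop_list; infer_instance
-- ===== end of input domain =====

-- B replaces A's per-day rescan of date with one dict grouping by 10-char prefix plus a lookup per day (faster; measured).

-- ===== PORT A =====
def get_sudden_drop_list (date : List String) (day : List String) : List (List String) :=
  day.foldl (fun sudden_drop_list days =>
    sudden_drop_list ++
      [date.foldl (fun col item =>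
        if PySem.Str.slice item none (some 10) == days then col ++ [item] else col) []]) []

-- ===== PORT B =====
def get_sudden_drop_list_alt (date : List String) (day : List String) : List (List String) :=
  let groups : PySem.Dict String (List String) :=
    date.foldl (fun d item =>
      d.modify (PySem.Str.slice item none (some 10)) [] (· ++ [item])) PySem.Dict.empty
  day.map (fun days => groups.getD days [])

-- ===== PRECONDITION & SPEC =====
def Spec_get_sudden_drop_list (date : List String) (day : List String) (out : List (List String)) : Prop := out = get_sudden_drop_list_alt date day
instance (date : List String) (day : List String) (out : List (List String)) : Decidable (Spec_get_sudden_drop_list date day out) := by unfold Spec_get_sudden_drop_list; infer_instance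

-- ===== CLAIM (what is proved, stated in full; the proofs are below) =====
def Claim_equal_get_sudden_drop_list : Prop := ∀ (date : List String) (day : List String), Dom_get_sudden_drop_list date day → Spec_get_sudden_drop_list date day (get_sudden_drop_list date day)

-- ===== LEMMAS AND PROOFS =====

-- the grouping dict's entry at `key` collects exactly the date entries whose 10-char prefix is `key`
lemma getD_group (date : List String) (d : PySem.Dict String (List String)) (key : String) :
    (date.foldl (fun d item =>
        d.modify (PySem.Str.slice item none (some 10)) [] (· ++ [item])) d).getD key []
      = d.getD key [] ++ date.filter (fun item => PySem.Str.slice item none (some 10) == key) := by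
  induction date generalizing d with
  | nil => simp
  | cons x xs ih =>
    simp only [List.foldl_cons, List.filter_cons, ih]
    by_cases h : PySem.Str.slice x none (some 10) = key
    · subst h
      simp [PySem.Dict.getD_modify_self]
    · rw [PySem.Dict.getD_modify_of_ne]
      · simp [h]
      · exact fun hk => h hk.symm

-- ===== VERDICT (by name: the statement is the Claim_ definition above) =====
theorem get_sudden_drop_list_spec : Claim_equal_get_sudden_drop_list := by
  intro date day _
  unfold Spec_get_sudden_drop_list get_sudden_drop_list get_sudden_drop_list_alt
  rw [PySem.List.foldl_append_singleton_eq_map]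
  refine List.map_congr_left (fun days _ => ?_)
  rw [getD_group, PySem.List.foldl_append_if]
  simp
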